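-- pv_equiv track=rewrite | github.com/ArturSanin/Python_Code | Small_Projects/Wolfram_Challenges/integers_with_given_digit_sums/find_with_given_digit_sum.py | find_with_given_digit_sum
-- ===== SOURCE A (Python) =====
-- def find_with_given_digit_sum(s):
--     """
--
--     :param s: Positive integer.
--     :return: List of integers below 1000, with digit sum equal s.
--     """
--
--     def get_digits(q):
--         """
--
--         :param q: Some positive integer.
--         :return: A list of all digits (integers from 0 to 9) of q.
--         Examples:
--             12345 -> [5, 4, 3, 2, 1]
--             50345 -> [5, 4, 3, 0, 5]
--             19564 -> [4, 6, 5, 9, 1]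
--         """
--         list_of_digits = []
--         loop_number = q
--         while loop_number > 0:
--             list_of_digits.append(loop_number % 10)
--             loop_number = (loop_number - loop_number % 10) // 10
--         return list_of_digits
--
--     if not isinstance(s, int) or s <= 0:
--         raise ValueError("First argument must be a positiv integer.")
--     else:
--         digit_sum_list = []
--         for i in range(1, 1000):
--             digit_list = get_digits(i)
--             digit_sum = 0
--             for digit in digit_list:
--                 digit_sum = digit_sum + digit
--             if digit_sum == s:
--                 digit_sum_list.append(i)
--             else:
--                 continue
--     return digit_sum_list
-- ===== SOURCE B (Python) =====
-- def find_with_given_digit_sum(s):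
--     if not isinstance(s, int) or s <= 0:
--         raise ValueError("First argument must be a positiv integer.")
--     result = []
--     for h in range(10):
--         for t in range(10):
--             for u in range(10):
--                 n = 100 * h + 10 * t + u
--                 if n != 0 and h + t + u == s:
--                     result.append(n)
--     return result
-- ===== Notes on version B (the rewrite author's own statement) =====
-- stated objective: alternative
-- what changed: Replaces the scan of all candidates with per-number digit extraction (a repeated modulo/floor-division loop) by three nested single-digit counters that form each candidate from its hundreds, tens and units digits and test the counters' sum directly, so no digit extraction happens at all.
import Mathlib
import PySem

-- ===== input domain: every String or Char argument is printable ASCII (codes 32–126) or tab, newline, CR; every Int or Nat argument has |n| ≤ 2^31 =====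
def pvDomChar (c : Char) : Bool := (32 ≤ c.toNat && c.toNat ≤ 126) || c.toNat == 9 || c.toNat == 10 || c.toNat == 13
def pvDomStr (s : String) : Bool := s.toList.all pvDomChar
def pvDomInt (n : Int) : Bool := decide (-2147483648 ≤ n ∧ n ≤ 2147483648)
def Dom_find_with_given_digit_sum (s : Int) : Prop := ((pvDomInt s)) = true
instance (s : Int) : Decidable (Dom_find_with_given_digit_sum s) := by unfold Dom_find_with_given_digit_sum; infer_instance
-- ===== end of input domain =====

-- B replaces per-number digit extraction by three nested digit counters; objective: alternative (not measured faster).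
-- A raises ValueError for s <= 0 (non-int is excluded by the type); Pre_ excludes exactly those inputs.
-- ===== PORT A =====
-- while loop of get_digits, made total with a fuel bound (q.toNat iterations always suffice:
-- the loop runs at most once per digit of q); structural recursion so the kernel can evaluate it.
def pvGetDigitsGo : Nat → List Int → Int → List Int
  | 0, acc, _ => acc
  | fuel + 1, acc, n =>
    if n > 0 then
      pvGetDigitsGo fuel (acc ++ [PySem.Int.mod n 10])
        (PySem.Int.floordiv (n - PySem.Int.mod n 10) 10)
    else acc

def pvGetDigits (q : Int) : List Int := pvGetDigitsGo q.toNat [] q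

def find_with_given_digit_sum (s : Int) : List Int :=
  if s ≤ 0 then []  -- Python raises ValueError here; excluded by Pre_
  else
    (PySem.List.pyRange 1 1000 1).foldl
      (fun acc i =>
        let digitSum := (pvGetDigits i).foldl (fun a d => a + d) 0
        if digitSum = s then acc ++ [i] else acc) []

-- ===== PORT B =====
def find_with_given_digit_sum_alt (s : Int) : List Int :=
  if s ≤ 0 then []  -- same guard as A
  else
    (PySem.List.pyRange 0 10 1).foldl (fun acc h =>
      (PySem.List.pyRange 0 10 1).foldl (fun acc t =>
        (PySem.List.pyRange 0 10 1).foldl (fun acc u =>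
          let n := 100 * h + 10 * t + u
          if n ≠ 0 ∧ h + t + u = s then acc ++ [n] else acc) acc) acc) []

-- ===== PRECONDITION & SPEC =====
-- Pre_: exactly the inputs where Python A returns (it raises ValueError for s <= 0).
def Pre_find_with_given_digit_sum (s : Int) : Prop := 0 < s
instance (s : Int) : Decidable (Pre_find_with_given_digit_sum s) := by
  unfold Pre_find_with_given_digit_sum; infer_instance
def pvWitness_find_with_given_digit_sum : Int := 5

def Spec_find_with_given_digit_sum (s : Int) (out : List Int) : Prop := out = find_with_given_digit_sum_alt s
instance (s : Int) (out : List Int) : Decidable (Spec_find_with_given_digit_sum s out) := by unfold Spec_find_with_given_digit_sum; infer_instance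

-- ===== CLAIM (what is proved, stated in full; the proofs are below) =====
def Claim_equal_find_with_given_digit_sum : Prop := ∀ (s : Int), Dom_find_with_given_digit_sum s → Pre_find_with_given_digit_sum s → Spec_find_with_given_digit_sum s (find_with_given_digit_sum s)

-- ===== LEMMAS AND PROOFS =====

-- A fold that never appends leaves its accumulator unchanged.
theorem pv_foldl_id {a b : Type} (l : List a) (g : List b -> a -> List b)
    (h : forall x, x ∈ l -> forall acc, g acc x = acc) :
    forall acc, l.foldl g acc = acc := by
  induction l with
  | nil => intro acc; rfl
  | cons y ys ih =>
      intro acc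
      rw [List.foldl_cons, h y (List.mem_cons_self), ih]
      intro x hx acc'; exact h x (List.mem_cons_of_mem _ hx) acc'

-- Digit sums of 1..999 are at most 27 (closed decidable fact about port A's helper).
set_option maxRecDepth 40000 in
theorem pv_dsum_le_27 :
    (PySem.List.pyRange 1 1000 1).all
      (fun i => decide ((pvGetDigits i).foldl (fun a d => a + d) 0 ≤ 27)) = true := by
  decide

theorem pv_range10_le_9 :
    (PySem.List.pyRange 0 10 1).all (fun x => decide (x ≤ 9)) = true := by decide

theorem pv_big_A (s : Int) (hs : 27 < s) : find_with_given_digit_sum s = [] := by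
  unfold find_with_given_digit_sum
  rw [if_neg (by omega)]
  apply pv_foldl_id
  intro i hi acc
  have := List.all_eq_true.mp pv_dsum_le_27 i hi
  simp only [decide_eq_true_eq] at this
  simp only []
  rw [if_neg (by omega)]

theorem pv_big_B (s : Int) (hs : 27 < s) : find_with_given_digit_sum_alt s = [] := by
  unfold find_with_given_digit_sum_alt
  rw [if_neg (by omega)]
  apply pv_foldl_id
  intro h hh acc
  apply pv_foldl_id
  intro t ht acc
  apply pv_foldl_id
  intro u hu acc
  have hh' := List.all_eq_true.mp pv_range10_le_9 h hh
  have ht' := List.all_eq_true.mp pv_range10_le_9 t ht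
  have hu' := List.all_eq_true.mp pv_range10_le_9 u hu
  simp only [decide_eq_true_eq] at hh' ht' hu'
  simp only []
  rw [if_neg (by omega)]

-- ===== VERDICT (by name: the statement is the Claim_ definition above) =====
set_option maxRecDepth 40000 in
set_option maxHeartbeats 2000000 in
theorem find_with_given_digit_sum_spec : Claim_equal_find_with_given_digit_sum := by
  intro s _ hpre
  unfold Spec_find_with_given_digit_sum
  unfold Pre_find_with_given_digit_sum at hpre
  by_cases hle : s ≤ 27
  · interval_cases s <;> decide
  · rw [pv_big_A s (by omega), pv_big_B s (by omega)]
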